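-- pv_equiv track=rewrite | github.com/NapierNLP/enunlg | scripts/tgen_classifier.py | rejoin_sem_classes
-- ===== SOURCE A (Python) =====
-- def rejoin_sem_classes(text):
--     out_list = []
--     curr_token = ""
--     for token in text.strip().split():
--         if token == "__":
--             if curr_token.startswith("__"):
--                 out_list.append(f"{curr_token}{token}")
--                 curr_token = ""
--             elif curr_token == "":
--                 curr_token = token
--         else:
--             if curr_token == "":
--                 out_list.append(token)
--             else:
--                 curr_token = f"{curr_token}{token}"
--     return " ".join(out_list)
-- ===== SOURCE B (Python) =====
-- def rejoin_sem_classes(text):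
--     tokens = text.strip().split()
--     out = []
--     i = 0
--     n = len(tokens)
--     while i < n:
--         if tokens[i] != "__":
--             out.append(tokens[i])
--             i += 1
--         else:
--             j = i + 1
--             while j < n and tokens[j] != "__":
--                 j += 1
--             if j == n:
--                 break
--             out.append("__" + "".join(tokens[i + 1:j]) + "__")
--             i = j + 1
--     return " ".join(out)
-- ===== Notes on version B (the rewrite author's own statement) =====
-- stated objective: alternative
-- what changed: Replaces A's state-machine fold threading a curr_token accumulator with an index/slice walk: on '__' an inner scan finds the closing '__' and the marker is spliced from the token slice in one step (unterminated tails fall out of the loop).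
import Mathlib
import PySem

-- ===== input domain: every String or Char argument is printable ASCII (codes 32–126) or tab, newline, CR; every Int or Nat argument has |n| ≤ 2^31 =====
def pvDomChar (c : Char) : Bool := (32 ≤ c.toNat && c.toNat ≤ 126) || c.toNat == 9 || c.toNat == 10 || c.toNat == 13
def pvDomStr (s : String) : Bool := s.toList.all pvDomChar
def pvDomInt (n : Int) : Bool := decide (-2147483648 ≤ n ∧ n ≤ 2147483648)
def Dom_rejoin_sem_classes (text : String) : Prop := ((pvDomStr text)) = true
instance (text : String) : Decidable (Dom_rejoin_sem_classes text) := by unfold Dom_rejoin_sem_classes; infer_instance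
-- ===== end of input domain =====

-- B rebuilds the markers by scanning ahead to the closing '__' and splicing token slices
-- instead of threading A's curr_token accumulator state machine (objective: alternative).

def pvMarker : List Char := ['_', '_']

-- ===== PORT A =====
-- A's for-loop over text.strip().split() as a fold over state (out_list, curr_token),
-- working on List Char (PySem.Chars is exact on the ASCII domain).
def pvStepA (st : List (List Char) × List Char) (token : List Char) : List (List Char) × List Char :=
  if token = pvMarker then
    if PySem.Chars.startswith st.2 pvMarker then (st.1 ++ [st.2 ++ token], [])
    else if st.2 = [] then (st.1, token)
    else st
  else
    if st.2 = [] then (st.1 ++ [token], st.2)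
    else (st.1, st.2 ++ token)

def rejoin_sem_classes (text : String) : String :=
  String.ofList (PySem.Chars.join [' ']
    (((PySem.Chars.split₀ (PySem.Chars.strip text.toList)).foldl pvStepA ([], [])).1))

-- ===== PORT B =====
-- inner while loop: scan forward to the next '__', returning (joined content, remaining tokens)
def pvScan : List (List Char) → Option (List Char × List (List Char))
  | [] => none
  | t :: rest =>
    if t = pvMarker then some ([], rest)
    else match pvScan rest with
      | some (c, r) => some (t ++ c, r)
      | none => none

theorem pvScan_length : ∀ (ts : List (List Char)) (c : List Char) (r : List (List Char)),
    pvScan ts = some (c, r) → r.length < ts.length := by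
  intro ts
  induction ts with
  | nil => intro c r h; simp [pvScan] at h
  | cons t rest ih =>
    intro c r h
    simp only [pvScan] at h
    split at h
    · simp at h
      obtain ⟨h1, h2⟩ := h
      simp [← h2]
    · cases hrec : pvScan rest with
      | none => rw [hrec] at h; simp at h
      | some p =>
        rw [hrec] at h; simp at h
        have := ih p.1 p.2 (by rw [hrec])
        simp [← h.2]; omega

-- outer while loop: walk the token list, splicing one whole marker per step
def pvGo : List (List Char) → List (List Char)
  | [] => []
  | t :: rest =>
    if t = pvMarker then
      match h : pvScan rest with
      | some (c, r) => (pvMarker ++ c ++ pvMarker) :: pvGo r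
      | none => []
    else t :: pvGo rest
termination_by ts => ts.length
decreasing_by
  · have := pvScan_length rest c r h; simp only [List.length_cons]; omega
  · simp only [List.length_cons]; omega

def rejoin_sem_classes_alt (text : String) : String :=
  String.ofList (PySem.Chars.join [' ']
    (pvGo (PySem.Chars.split₀ (PySem.Chars.strip text.toList))))

-- ===== PRECONDITION & SPEC =====
def Spec_rejoin_sem_classes (text : String) (out : String) : Prop := out = rejoin_sem_classes_alt text
instance (text : String) (out : String) : Decidable (Spec_rejoin_sem_classes text out) := by unfold Spec_rejoin_sem_classes; infer_instance

-- ===== CLAIM (what is proved, stated in full; the proofs are below) =====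
def Claim_equal_rejoin_sem_classes : Prop := ∀ (text : String), Dom_rejoin_sem_classes text → Spec_rejoin_sem_classes text (rejoin_sem_classes text)

-- ===== LEMMAS AND PROOFS =====

theorem pv_startswith_marker (s : List Char) :
    PySem.Chars.startswith (pvMarker ++ s) pvMarker = true := by
  rw [PySem.Chars.startswith_iff]; exact List.prefix_append _ _

theorem pv_startswith_nil : PySem.Chars.startswith ([] : List Char) pvMarker = false := by
  decide

-- the core invariant: A's fold, started with empty curr, produces pvGo;
-- started inside a marker (curr = "__" ++ s), it produces the spliced marker when pvScan closes it.
theorem pv_fold_eq (ts : List (List Char)) :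
    (∀ out, (ts.foldl pvStepA (out, [])).1 = out ++ pvGo ts) ∧
    (∀ out s, (ts.foldl pvStepA (out, pvMarker ++ s)).1 =
      match pvScan ts with
      | some (c, r) => out ++ [pvMarker ++ s ++ c ++ pvMarker] ++ pvGo r
      | none => out) := by
  induction ts with
  | nil => exact ⟨fun out => by simp [pvGo], fun out s => by simp [pvScan]⟩
  | cons t rest ih =>
    constructor
    · intro out
      by_cases ht : t = pvMarker
      · subst ht
        have : pvStepA (out, []) pvMarker = (out, pvMarker) := by
          simp [pvStepA, pv_startswith_nil]
        rw [List.foldl_cons, this]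
        have h2 := ih.2 out []
        simp only [List.append_nil] at h2
        rw [h2]
        cases hs : pvScan rest with
        | none => simp [pvGo]; split <;> simp_all
        | some p =>
          obtain ⟨c, r⟩ := p
          simp [pvGo]; split <;> simp_all
      · have : pvStepA (out, []) t = (out ++ [t], []) := by
          simp [pvStepA, ht]
        rw [List.foldl_cons, this, ih.1]
        simp [pvGo, ht]
    · intro out s
      by_cases ht : t = pvMarker
      · subst ht
        have : pvStepA (out, pvMarker ++ s) pvMarker
            = (out ++ [pvMarker ++ s ++ pvMarker], []) := by
          simp [pvStepA, pv_startswith_marker]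
        rw [List.foldl_cons, this, ih.1]
        simp [pvScan]
      · have hne : pvMarker ++ s ≠ [] := by simp [pvMarker]
        have : pvStepA (out, pvMarker ++ s) t = (out, pvMarker ++ (s ++ t)) := by
          simp [pvStepA, ht, hne]
        rw [List.foldl_cons, this, ih.2 out (s ++ t)]
        cases hs : pvScan rest with
        | none => simp [pvScan, ht, hs]
        | some p =>
          obtain ⟨c, r⟩ := p
          simp [pvScan, ht, hs]

-- ===== VERDICT (by name: the statement is the Claim_ definition above) =====
theorem rejoin_sem_classes_spec : Claim_equal_rejoin_sem_classes := by
  intro text _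
  unfold Spec_rejoin_sem_classes rejoin_sem_classes rejoin_sem_classes_alt
  rw [(pv_fold_eq _).1 []]
  simp
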